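-- pv_equiv track=rewrite | github.com/lw0/snap | actions/hdl_fosix/tools/registers.py | split_extent_rows
-- ===== SOURCE A (Python) =====
-- def split_extent_rows(ext_list, row_entries=15):
--   entry_count = len(ext_list)
--   row_count = (entry_count - 1) // row_entries + 1
--   rows = []
--   for i in range(row_count):
--     beg_entry = row_entries*i
--     end_entry = min(row_entries*(i+1), entry_count)
--     pad_entries = row_entries - end_entry + beg_entry + 1
--     row_content = ext_list[row_entries*i:min(row_entries*(i+1), entry_count)]
--     row_end = row_content[-1][0]+row_content[-1][2]
--     row = [ (e[0],e[1]) for e in row_content ] + [ (row_end, 0) for i in range(pad_entries) ]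
--     rows.append(row)
--   return rows
-- ===== SOURCE B (Python) =====
-- def split_extent_rows(ext_list, row_entries=15):
--     # Single streaming pass with an accumulator row instead of index arithmetic + slicing.
--     rows = []
--     cur = []
--     last = None
--     for e in ext_list:
--         cur.append((e[0], e[1]))
--         last = e
--         if len(cur) == row_entries:
--             end = last[0] + last[2]
--             rows.append(cur + [(end, 0)])
--             cur = []
--     if cur:
--         end = last[0] + last[2]
--         rows.append(cur + [(end, 0)] * (row_entries - len(cur) + 1))
--     return rows
-- ===== Notes on version B (the rewrite author's own statement) =====
-- stated objective: alternative
-- what changed: Replaces per-row index arithmetic with slicing (one slice copy and a range-built pad per row) by a single streaming pass that accumulates the current row and flushes/pads it when full and once at the end.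
-- outside the precondition, e.g. on split_extent_rows([(1, 2, 3), (4, 5, 6)], -1): A returns [], B returns [[(1, 2), (4, 5)]]; on split_extent_rows([(1, 2, 3)], 0): A raises ZeroDivisionError, B returns [[(1, 2)]]; on split_extent_rows([(1, 2, 3)], -1): A raises IndexError, B returns [[(1, 2)]]
import Mathlib
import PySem

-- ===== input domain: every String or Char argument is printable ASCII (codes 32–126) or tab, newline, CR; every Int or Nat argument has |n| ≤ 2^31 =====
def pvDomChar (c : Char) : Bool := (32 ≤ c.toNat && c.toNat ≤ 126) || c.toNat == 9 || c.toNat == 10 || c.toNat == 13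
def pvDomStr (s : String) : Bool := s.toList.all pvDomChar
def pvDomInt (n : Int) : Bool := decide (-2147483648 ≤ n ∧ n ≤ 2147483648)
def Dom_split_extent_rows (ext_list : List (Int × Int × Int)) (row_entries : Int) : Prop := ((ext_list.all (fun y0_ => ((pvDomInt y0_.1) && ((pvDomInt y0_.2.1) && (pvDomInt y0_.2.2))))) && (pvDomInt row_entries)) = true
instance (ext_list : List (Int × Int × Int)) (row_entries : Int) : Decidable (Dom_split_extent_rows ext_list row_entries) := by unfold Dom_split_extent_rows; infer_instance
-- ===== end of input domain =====

-- B replaces A's row-index arithmetic + slicing by one streaming pass with an accumulator row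
-- (objective: alternative decomposition, same O(n) cost).

-- ===== PORT A =====
-- loop body of A (one row), kept as a named helper; `row_content[-1]` is pyGet? (-1);
-- its IndexError case (empty row_content) is excluded by Pre_ and the getD default is never used there
def pvRowA (ext_list : List (Int × Int × Int)) (row_entries i : Int) : List (Int × Int) :=
  let entry_count : Int := (ext_list.length : Int)
  let beg_entry := row_entries * i
  let end_entry := min (row_entries * (i + 1)) entry_count
  let pad_entries := row_entries - end_entry + beg_entry + 1
  let row_content := PySem.List.slice ext_list (some (row_entries * i)) (some (min (row_entries * (i + 1)) entry_count))
  let last := (PySem.List.pyGet? row_content (-1)).getD (0, 0, 0)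
  let row_end := last.1 + last.2.2
  row_content.map (fun e => (e.1, e.2.1)) ++ (PySem.List.pyRange 0 pad_entries 1).map (fun _ => (row_end, 0))

def split_extent_rows (ext_list : List (Int × Int × Int)) (row_entries : Int) : List (List (Int × Int)) :=
  let entry_count : Int := (ext_list.length : Int)
  let row_count := PySem.Int.floordiv (entry_count - 1) row_entries + 1
  (PySem.List.pyRange 0 row_count 1).foldl
    (fun rows i => rows ++ [pvRowA ext_list row_entries i]) []

-- ===== PORT B =====
-- state: (rows so far, current row, last element seen)
def pvAltStep (row_entries : Int)
    (st : List (List (Int × Int)) × List (Int × Int) × Option (Int × Int × Int))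
    (e : Int × Int × Int) :
    List (List (Int × Int)) × List (Int × Int) × Option (Int × Int × Int) :=
  let cur := st.2.1 ++ [(e.1, e.2.1)]
  if (cur.length : Int) = row_entries then
    (st.1 ++ [cur ++ [(e.1 + e.2.2, 0)]], [], some e)
  else
    (st.1, cur, some e)

def pvAltFinish (row_entries : Int)
    (st : List (List (Int × Int)) × List (Int × Int) × Option (Int × Int × Int)) :
    List (List (Int × Int)) :=
  match st with
  | (rows, [], _) => rows
  | (rows, _, none) => rows   -- unreachable: a nonempty current row implies a last element was seen
  | (rows, cur, some last) =>
      rows ++ [cur ++ List.replicate (row_entries - (cur.length : Int) + 1).toNat (last.1 + last.2.2, 0)]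

def split_extent_rows_alt (ext_list : List (Int × Int × Int)) (row_entries : Int) : List (List (Int × Int)) :=
  pvAltFinish row_entries (ext_list.foldl (pvAltStep row_entries) ([], [], none))

-- ===== PRECONDITION & SPEC =====
-- Pre_ restricts to the natural domain row_entries ≥ 1: A raises ZeroDivisionError at row_entries = 0
-- and IndexError for negative row_entries on lists of length ≤ 1; for negative row_entries on longer
-- lists A's value [] is an accident of its row_count formula outside the function's domain.
def Pre_split_extent_rows (ext_list : List (Int × Int × Int)) (row_entries : Int) : Prop :=
  1 ≤ row_entries
instance (ext_list : List (Int × Int × Int)) (row_entries : Int) : Decidable (Pre_split_extent_rows ext_list row_entries) := by unfold Pre_split_extent_rows; infer_instance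

def pvWitness_split_extent_rows : (List (Int × Int × Int)) × Int := ([(1, 2, 3), (4, 5, 6), (7, 8, 9)], 2)

def Spec_split_extent_rows (ext_list : List (Int × Int × Int)) (row_entries : Int) (out : List (List (Int × Int))) : Prop := out = split_extent_rows_alt ext_list row_entries
instance (ext_list : List (Int × Int × Int)) (row_entries : Int) (out : List (List (Int × Int))) : Decidable (Spec_split_extent_rows ext_list row_entries out) := by unfold Spec_split_extent_rows; infer_instance

-- ===== CLAIM (what is proved, stated in full; the proofs are below) =====
def Claim_equal_split_extent_rows : Prop := ∀ (ext_list : List (Int × Int × Int)) (row_entries : Int), Dom_split_extent_rows ext_list row_entries → Pre_split_extent_rows ext_list row_entries → Spec_split_extent_rows ext_list row_entries (split_extent_rows ext_list row_entries)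

-- ===== LEMMAS AND PROOFS =====

def pvProj (e : Int × Int × Int) : Int × Int := (e.1, e.2.1)
def pvEnd (e : Int × Int × Int) : Int × Int := (e.1 + e.2.2, 0)

-- the common chunk-level description both ports are reduced to (row size = R+1)
def pvRow (r : Int) (chunk : List (Int × Int × Int)) : List (Int × Int) :=
  chunk.map pvProj ++
    List.replicate (r - (chunk.length : Int) + 1).toNat (pvEnd (chunk.getLast?.getD (0, 0, 0)))

def pvChunks (r : Int) (R : Nat) : List (Int × Int × Int) → List (List (Int × Int))
  | [] => []
  | x :: xs => pvRow r ((x :: xs).take (R + 1)) :: pvChunks r R ((x :: xs).drop (R + 1))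
  termination_by xs => xs.length
  decreasing_by simp

theorem pvChunks_nil (r : Int) (R : Nat) : pvChunks r R [] = [] := by
  simp [pvChunks]

theorem pvChunks_cons (r : Int) (R : Nat) (x : Int × Int × Int) (xs : List (Int × Int × Int)) :
    pvChunks r R (x :: xs)
      = pvRow r ((x :: xs).take (R + 1)) :: pvChunks r R ((x :: xs).drop (R + 1)) := by
  conv_lhs => rw [pvChunks.eq_def]

theorem pvB_loop (r : Int) (R : Nat) (hr : r = (R : Int) + 1) :
    ∀ (xs p : List (Int × Int × Int)) (rows : List (List (Int × Int)))
      (o : Option (Int × Int × Int)),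
      p.length ≤ R → (p = [] ∨ o = p.getLast?) →
      pvAltFinish r (xs.foldl (pvAltStep r) (rows, p.map pvProj, o)) =
        rows ++ pvChunks r R (p ++ xs) := by
  intro xs
  induction xs with
  | nil =>
    intro p rows o hp ho
    simp only [List.foldl_nil, List.append_nil]
    cases p with
    | nil => simp [pvAltFinish, pvChunks]
    | cons x t =>
      rcases ho with ho | ho
      · exact absurd ho (by simp)
      subst ho
      obtain ⟨l, hl⟩ : ∃ l, (x :: t).getLast? = some l := by
        cases h : (x :: t).getLast? with
        | none => simp at h
        | some l => exact ⟨l, rfl⟩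
      rw [hl]
      have hle : (x :: t).length ≤ R + 1 := Nat.le_succ_of_le hp
      unfold pvChunks
      rw [List.take_of_length_le hle, List.drop_of_length_le hle]
      unfold pvChunks
      simp [pvAltFinish, pvRow, pvEnd, hl]
  | cons e xs ih =>
    intro p rows o hp ho
    simp only [List.foldl_cons]
    have hcur : pvAltStep r (rows, p.map pvProj, o) e =
        if ((p.length : Int) + 1 = r) then
          (rows ++ [(p ++ [e]).map pvProj ++ [pvEnd e]], List.map pvProj [], some e)
        else (rows, (p ++ [e]).map pvProj, some e) := by
      unfold pvAltStep
      simp [pvProj, pvEnd]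
    rw [hcur]
    by_cases hfull : (p.length : Int) + 1 = r
    · rw [if_pos hfull]
      rw [ih ([]) (rows ++ [(p ++ [e]).map pvProj ++ [pvEnd e]]) (some e) (by simp) (Or.inl rfl)]
      have hlen : (p ++ [e]).length = R + 1 := by simp; omega
      have hchunk : ∀ (c : List (Int × Int × Int)), c.length = R + 1 →
          pvChunks r R (c ++ xs) = pvRow r c :: pvChunks r R xs := by
        intro c hc
        cases c with
        | nil => simp at hc
        | cons y t =>
          have ht : t.length = R := by simpa using hc
          subst ht
          rw [show (y :: t) ++ xs = y :: (t ++ xs) from rfl]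
          unfold pvChunks
          rw [List.take_succ_cons, List.drop_succ_cons, List.take_left, List.drop_left,
            ← pvChunks.eq_def]
      have h1 : p ++ e :: xs = (p ++ [e]) ++ xs := by simp
      rw [h1, hchunk (p ++ [e]) hlen]
      have hrow : pvRow r (p ++ [e]) = (p ++ [e]).map pvProj ++ [pvEnd e] := by
        unfold pvRow
        rw [show ((p ++ [e]).length : Int) = (R : Int) + 1 by rw [hlen]; push_cast; ring]
        rw [show r - ((R : Int) + 1) + 1 = 1 by omega]
        simp
      rw [hrow]
      simp
    · rw [if_neg hfull]
      rw [ih (p ++ [e]) rows (some e) (by simp at hp ⊢; omega) (Or.inr (by simp))]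
      simp

theorem pvMapConstPyRange {α : Type} (c : α) (m : Int) :
    (PySem.List.pyRange 0 m 1).map (fun _ => c) = List.replicate m.toNat c := by
  rw [PySem.List.pyRange_one]
  simp [Function.comp_def, List.map_const']

theorem pvRowA_zero (r : Int) (R : Nat) (hr : r = (R : Int) + 1)
    (xs : List (Int × Int × Int)) :
    pvRowA xs r 0 = pvRow r (xs.take (R + 1)) := by
  simp only [pvRowA, pvRow]
  rw [mul_zero, zero_add, mul_one]
  have hsl : PySem.List.slice xs (some 0) (some (min r (xs.length : Int))) = xs.take (R + 1) := by
    rw [PySem.List.slice_toNat xs le_rfl (by omega)]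
    rw [show ((0 : Int)).toNat = 0 from rfl, List.drop_zero, Nat.sub_zero]
    rw [show (min r ((xs.length : Int))).toNat = min (R + 1) xs.length by omega]
    rw [Nat.min_comm, ← List.take_take]
    exact List.take_of_length_le (by rw [List.length_take]; omega)
  rw [hsl, PySem.List.pyGet?_neg_one, pvMapConstPyRange]
  have hpad : (r - min r (xs.length : Int) + 0 + 1).toNat
      = (r - ((xs.take (R + 1)).length : Int) + 1).toNat := by
    rw [List.length_take]; omega
  rw [hpad]
  have hproj : pvProj = (fun e : Int × Int × Int => (e.1, e.2.1)) := rfl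
  rw [hproj]
  simp [pvEnd]

theorem pvRowA_shift (r : Int) (R : Nat) (hr : r = (R : Int) + 1)
    (xs : List (Int × Int × Int)) (h : R + 1 ≤ xs.length) (k : Nat) :
    pvRowA xs r ((k : Int) + 1) = pvRowA (xs.drop (R + 1)) r (k : Int) := by
  have ha : 0 ≤ r * (k : Int) := mul_nonneg (by omega) (Int.natCast_nonneg k)
  have hlen : (((xs.drop (R + 1)).length : Int)) = (xs.length : Int) - r := by
    rw [List.length_drop]; omega
  simp only [pvRowA]
  rw [hlen]
  rw [show r * (((k : Int) + 1) + 1) = r * k + r + r by ring,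
      show r * ((k : Int) + 1) = r * k + r by ring]
  have hs : PySem.List.slice xs (some (r * k + r)) (some (min (r * k + r + r) (xs.length : Int)))
      = PySem.List.slice (xs.drop (R + 1)) (some (r * k)) (some (min (r * k + r) ((xs.length : Int) - r))) := by
    rw [PySem.List.slice_toNat xs (by omega) (le_min (by omega) (Int.natCast_nonneg _)),
        PySem.List.slice_toNat (xs.drop (R + 1)) ha (le_min (by omega) (by omega))]
    have hd : (r * k + r).toNat = (r * (k : Int)).toNat + (R + 1) := by omega
    have hc : (min (r * k + r + r) ((xs.length : Int))).toNat - ((r * (k : Int)).toNat + (R + 1))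
        = (min (r * k + r) ((xs.length : Int) - r)).toNat - (r * (k : Int)).toNat := by
      omega
    rw [hd, hc,
      show (r * (k : Int)).toNat + (R + 1) = (R + 1) + (r * (k : Int)).toNat from Nat.add_comm _ _,
      ← List.drop_drop]
  rw [hs]
  have hpad : r - min (r * k + r + r) (xs.length : Int) + (r * k + r) + 1
      = r - min (r * k + r) ((xs.length : Int) - r) + r * k + 1 := by omega
  rw [hpad]

theorem pvA_rows (r : Int) (R : Nat) (hr : r = (R : Int) + 1) :
    ∀ (xs : List (Int × Int × Int)),
      (PySem.List.pyRange 0 (PySem.Int.floordiv ((xs.length : Int) - 1) r + 1) 1).map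
          (pvRowA xs r) =
        pvChunks r R xs := by
  have main : ∀ (n : Nat) (xs : List (Int × Int × Int)), xs.length = n →
      (PySem.List.pyRange 0 (PySem.Int.floordiv ((xs.length : Int) - 1) r + 1) 1).map
          (pvRowA xs r) = pvChunks r R xs := by
    intro n
    induction n using Nat.strong_induction_on with
    | _ n ih =>
      intro xs hn
      cases xs with
      | nil =>
        have h0 : PySem.Int.floordiv (-1) r = -1 := by
          rw [PySem.Int.floordiv_eq_iff_of_pos (by omega)]
          constructor <;> omega
        simp only [List.length_nil, Nat.cast_zero, zero_sub]
        rw [h0, show (-1 : Int) + 1 = 0 by ring,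
          PySem.List.pyRange_one_eq_nil le_rfl]
        simp [pvChunks]
      | cons x t =>
        set m : Int := (((x :: t).length : Int)) with hm
        have hm1 : 1 ≤ m := by simp [hm]
        by_cases hsmall : m ≤ r
        · -- a single (final) row
          have h0 : PySem.Int.floordiv (m - 1) r = 0 := by
            rw [PySem.Int.floordiv_eq_iff_of_pos (by omega)]
            constructor <;> omega
          rw [h0, zero_add, PySem.List.pyRange_one_cons (show (0 : Int) < 1 by omega),
            show (0 : Int) + 1 = 1 by ring, PySem.List.pyRange_one_eq_nil (le_refl (1 : Int)),
            List.map_cons, List.map_nil]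
          rw [pvRowA_zero r R hr]
          have hdrop : (x :: t).drop (R + 1) = [] :=
            List.drop_of_length_le (by simp [hm] at hsmall ⊢; omega)
          rw [pvChunks_cons, hdrop, pvChunks_nil]
        · -- first row, then recurse on the rest
          have hq : 1 ≤ PySem.Int.floordiv (m - 1) r := by
            rw [PySem.Int.le_floordiv_iff_mul_le (by omega)]
            omega
          have hcons : PySem.List.pyRange 0 (PySem.Int.floordiv (m - 1) r + 1) 1
              = 0 :: PySem.List.pyRange 1 (PySem.Int.floordiv (m - 1) r + 1) 1 :=
            PySem.List.pyRange_one_cons (by omega)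
          rw [hcons, List.map_cons, pvRowA_zero r R hr]
          have hRlen : R + 1 ≤ (x :: t).length := by simp [hm] at hsmall ⊢; omega
          -- tail rows
          have hlen' : (((x :: t).drop (R + 1)).length : Int) = m - r := by
            rw [List.length_drop]; simp [hm] at hsmall ⊢; omega
          have hrc : PySem.Int.floordiv (m - 1) r = PySem.Int.floordiv ((m - r) - 1) r + 1 := by
            have := Int.add_mul_ediv_right ((m - r) - 1) 1 (show r ≠ 0 by omega)
            rw [PySem.Int.floordiv_eq_ediv_of_pos (by omega),
                PySem.Int.floordiv_eq_ediv_of_pos (by omega)]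
            rw [show m - 1 = (m - r - 1) + 1 * r by ring, this]
          have htail : (PySem.List.pyRange 1 (PySem.Int.floordiv (m - 1) r + 1) 1).map
                (pvRowA (x :: t) r)
              = (PySem.List.pyRange 0 (PySem.Int.floordiv ((m - r) - 1) r + 1) 1).map
                (pvRowA ((x :: t).drop (R + 1)) r) := by
            rw [PySem.List.pyRange_one 1, PySem.List.pyRange_one 0, List.map_map, List.map_map]
            rw [show (PySem.Int.floordiv (m - 1) r + 1 - 1).toNat
                = (PySem.Int.floordiv ((m - r) - 1) r + 1 - 0).toNat by omega]
            apply List.map_congr_left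
            intro k _
            simp only [Function.comp_apply]
            rw [show (1 : Int) + (k : Int) = (k : Int) + 1 by ring, zero_add]
            exact pvRowA_shift r R hr (x :: t) hRlen k
          rw [htail]
          have hrec := ih ((x :: t).drop (R + 1)).length
            (by rw [List.length_drop]; omega) ((x :: t).drop (R + 1)) rfl
          rw [hlen'] at hrec
          rw [hrec, pvChunks_cons]
  intro xs
  exact main xs.length xs rfl

-- ===== VERDICT (by name: the statement is the Claim_ definition above) =====
theorem split_extent_rows_spec : Claim_equal_split_extent_rows := by
  intro xs r _ hpre
  unfold Spec_split_extent_rows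
  obtain ⟨R, hR⟩ : ∃ R : Nat, r = (R : Int) + 1 :=
    ⟨(r - 1).toNat, by unfold Pre_split_extent_rows at hpre; omega⟩
  have hA := pvA_rows r R hR xs
  have hB := pvB_loop r R hR xs [] [] none (by simp) (Or.inl rfl)
  simp only [List.map_nil, List.nil_append, List.getLast?_nil] at hB
  unfold split_extent_rows split_extent_rows_alt
  rw [hB, PySem.List.foldl_append_singleton_eq_map, hA]
  simp
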